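-- pv_equiv track=rewrite | github.com/dj-on-github/RNGBook_Code | gf.py | matrix2str_binary_2d
-- ===== SOURCE A (Python) =====
-- def matrix2str_binary_2d(matrix):
--     size = len(matrix)
--     result = ""
--     i =0
--     for row in matrix:
--         rownum = 0
--         if i == 0:
--             astr = "["
--         else:
--             astr = " "
--
--         for elem in row:
--             if elem == 1:
--                 astr += "1"
--                 #rownum = ((rownum << 1) | 0x00000001)
--             else:
--                 astr += "0"
--                 #rownum = ((rownum << 1) & 0xffffffff)
--         if i == (size-1):
--             result += "%s]" % astr
--         else:
--             result += "%s,\n" % astr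
--         i = i+1
--     return result
-- ===== SOURCE B (Python) =====
-- def matrix2str_binary_2d(matrix):
--     # Recursive decomposition: the closing ']' comes from the base case and the
--     # separator ',\n ' is prefixed to every non-first row; no index counter.
--     def bits(row):
--         if not row:
--             return ''
--         return ('1' if row[0] == 1 else '0') + bits(row[1:])
--
--     def rest(rows):
--         if not rows:
--             return ']'
--         return ',\n ' + bits(rows[0]) + rest(rows[1:])
--
--     if not matrix:
--         return ''
--     return '[' + bits(matrix[0]) + rest(matrix[1:])
-- ===== Notes on version B (the rewrite author's own statement) =====
-- stated objective: alternative
-- what changed: Replaces A's indexed loop with first/last special-case branches and a mutating accumulator by a structural recursion over rows: the base case emits the closing ']' and each recursive step prefixes the ',\n ' separator, so no index or size comparison exists.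
import Mathlib
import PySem

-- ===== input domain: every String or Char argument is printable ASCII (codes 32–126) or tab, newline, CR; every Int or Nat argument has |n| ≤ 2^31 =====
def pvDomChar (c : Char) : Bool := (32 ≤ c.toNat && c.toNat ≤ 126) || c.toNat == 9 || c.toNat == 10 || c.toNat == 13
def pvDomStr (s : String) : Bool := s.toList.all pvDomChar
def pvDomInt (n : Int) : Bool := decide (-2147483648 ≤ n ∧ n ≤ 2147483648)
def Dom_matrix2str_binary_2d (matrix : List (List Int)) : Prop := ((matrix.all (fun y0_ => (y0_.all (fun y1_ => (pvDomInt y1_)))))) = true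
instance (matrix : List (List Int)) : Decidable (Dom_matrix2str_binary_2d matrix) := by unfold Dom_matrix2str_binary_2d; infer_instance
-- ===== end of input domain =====

-- B replaces A's indexed loop with first/last special-case branches by a structural
-- recursion over rows: the base case emits ']' and each step prefixes ',\n '; objective: alternative.

-- ===== PORT A =====
-- inner 'for elem in row' loop of A, accumulating onto astr
def pvRowA (astr : String) (row : List Int) : String :=
  row.foldl (fun s e => if e == 1 then s ++ "1" else s ++ "0") astr

-- one iteration of A's outer loop; state = (result, i), size captured
def pvStepA (size : Int) (st : String × Int) (row : List Int) : String × Int :=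
  let astr := if st.2 == 0 then "[" else " "
  let astr := pvRowA astr row
  if st.2 == size - 1 then (st.1 ++ (astr ++ "]"), st.2 + 1)
  else (st.1 ++ (astr ++ ",\n"), st.2 + 1)

def matrix2str_binary_2d (matrix : List (List Int)) : String :=
  (matrix.foldl (pvStepA (matrix.length : Int)) ("", 0)).1

-- ===== PORT B =====
-- bits(row): recursion on the row
def pvBitsB (row : List Int) : String :=
  match row with
  | [] => ""
  | e :: t => (if e == 1 then "1" else "0") ++ pvBitsB t

-- rest(rows): recursion on the remaining rows; base case closes with ']'
def pvRestB (rows : List (List Int)) : String :=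
  match rows with
  | [] => "]"
  | r :: t => ",\n " ++ pvBitsB r ++ pvRestB t

def matrix2str_binary_2d_alt (matrix : List (List Int)) : String :=
  match matrix with
  | [] => ""
  | r :: rows => "[" ++ pvBitsB r ++ pvRestB rows

-- ===== PRECONDITION & SPEC =====
def Spec_matrix2str_binary_2d (matrix : List (List Int)) (out : String) : Prop := out = matrix2str_binary_2d_alt matrix
instance (matrix : List (List Int)) (out : String) : Decidable (Spec_matrix2str_binary_2d matrix out) := by unfold Spec_matrix2str_binary_2d; infer_instance

-- ===== CLAIM (what is proved, stated in full; the proofs are below) =====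
def Claim_equal_matrix2str_binary_2d : Prop := ∀ (matrix : List (List Int)), Dom_matrix2str_binary_2d matrix → Spec_matrix2str_binary_2d matrix (matrix2str_binary_2d matrix)

-- ===== LEMMAS AND PROOFS =====

def pvBit (e : Int) : Char := if e == 1 then '1' else '0'

lemma pvBitsB_toList (row : List Int) :
    (pvBitsB row).toList = row.map pvBit := by
  induction row with
  | nil => rfl
  | cons e t ih =>
    by_cases h1 : e = 1 <;> simp [pvBitsB, pvBit, h1, ih]

lemma pvRowA_toList (row : List Int) (astr : String) :
    (pvRowA astr row).toList = astr.toList ++ row.map pvBit := by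
  induction row generalizing astr with
  | nil => simp [pvRowA]
  | cons e row ih =>
    simp only [pvRowA, List.foldl_cons] at *
    rw [ih]
    by_cases h1 : e = 1 <;> simp [h1, pvBit]

-- A's outer loop over the remaining rows, when at least one row was already emitted
-- (0 < i) and exactly the remaining rows are left (i + len = size)
lemma pvStepA_tail (size : Int) (rows : List (List Int)) (r : List Int)
    (acc : String) (i : Int) (hi : 0 < i)
    (hlen : i + ((r :: rows).length : Int) = size) :
    ((r :: rows).foldl (pvStepA size) (acc, i)).1.toList
      = acc.toList ++ ' ' :: (pvBitsB r).toList ++ (pvRestB rows).toList := by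
  induction rows generalizing r acc i with
  | nil =>
    have h0 : (i == 0) = false := by simp; omega
    have h1 : (i == size - 1) = true := by simp at hlen ⊢; omega
    simp only [List.foldl_cons, List.foldl_nil, pvStepA, h0, h1, if_false, if_true,
      Bool.false_eq_true]
    simp [pvRowA_toList, pvBitsB_toList, pvRestB]
  | cons r2 rs ih =>
    have h0 : (i == 0) = false := by simp; omega
    have h1 : (i == size - 1) = false := by simp at hlen ⊢; omega
    have hlen' : (i + 1) + ((r2 :: rs).length : Int) = size := by
      simp at hlen ⊢; omega
    have hstep : pvStepA size (acc, i) r = (acc ++ (pvRowA " " r ++ ",\n"), i + 1) := by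
      simp only [pvStepA, h0, h1, Bool.false_eq_true, if_false]
    rw [List.foldl_cons, hstep,
      ih r2 (acc ++ (pvRowA " " r ++ ",\n")) (i + 1) (by omega) hlen']
    simp [pvRowA_toList, pvBitsB_toList, pvRestB]

-- ===== VERDICT (by name: the statement is the Claim_ definition above) =====
theorem matrix2str_binary_2d_spec : Claim_equal_matrix2str_binary_2d := by
  intro matrix _
  unfold Spec_matrix2str_binary_2d matrix2str_binary_2d matrix2str_binary_2d_alt
  match matrix with
  | [] => rfl
  | [r] =>
    apply String.toList_inj.mp
    have h1 : ((0 : Int) == (([r].length : Int) - 1)) = true := by simp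
    simp only [List.foldl_cons, List.foldl_nil, pvStepA, h1, if_true, beq_self_eq_true]
    simp [pvRowA_toList, pvBitsB_toList, pvRestB]
  | r :: r2 :: rs =>
    apply String.toList_inj.mp
    have h1 : ((0 : Int) == (((r :: r2 :: rs).length : Int) - 1)) = false := by
      simp; omega
    have hstep : pvStepA ((r :: r2 :: rs).length : Int) ("", 0) r
        = ("" ++ (pvRowA "[" r ++ ",\n"), 1) := by
      simp only [pvStepA, h1, Bool.false_eq_true, if_false, beq_self_eq_true, if_true]
      norm_num
    rw [List.foldl_cons, hstep,
      pvStepA_tail ((r :: r2 :: rs).length : Int) rs r2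
        ("" ++ (pvRowA "[" r ++ ",\n")) 1 (by omega) (by simp; omega)]
    simp [pvRowA_toList, pvBitsB_toList, pvRestB]
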